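-- pv_equiv track=rewrite | github.com/gabbyevaristo/algo-practice | stacks/stackpractice.py | pairwiseConsecutive
-- ===== SOURCE A (Python) =====
-- def pairwiseConsecutive(stack):
--     # Add values to a temporary stack (first element will be on tos)
--     temp = []
--     while stack:
--         temp.append(stack.pop())
--
--     result = True
--     while len(temp) > 1:
--         x = temp.pop()
--         y = temp.pop()
--         if abs(x-y) != 1:           # Can just return False if function does not say
--             result = False          # stack needs to retain original stack content
--
--         stack.append(x)             # Add values back to stack
--         stack.append(y)
--
--     if len(temp) == 1: stack.append(temp.pop())
--     return result
-- ===== SOURCE B (Python) =====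
-- def pairwiseConsecutive(stack):
--     # Check adjacent index pairs directly; never mutates stack (A pops everything
--     # and pushes it back, restoring the original order, so net mutation is none).
--     return all(abs(stack[i] - stack[i + 1]) == 1 for i in range(0, len(stack) - 1, 2))
-- ===== Notes on version B (the rewrite author's own statement) =====
-- stated objective: simpler
-- what changed: Replaces the two-phase stack simulation (pop everything onto a temp stack, then pop pairs and push them back) with a single non-mutating pass over index pairs via all() and range(0, len-1, 2).
import Mathlib
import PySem

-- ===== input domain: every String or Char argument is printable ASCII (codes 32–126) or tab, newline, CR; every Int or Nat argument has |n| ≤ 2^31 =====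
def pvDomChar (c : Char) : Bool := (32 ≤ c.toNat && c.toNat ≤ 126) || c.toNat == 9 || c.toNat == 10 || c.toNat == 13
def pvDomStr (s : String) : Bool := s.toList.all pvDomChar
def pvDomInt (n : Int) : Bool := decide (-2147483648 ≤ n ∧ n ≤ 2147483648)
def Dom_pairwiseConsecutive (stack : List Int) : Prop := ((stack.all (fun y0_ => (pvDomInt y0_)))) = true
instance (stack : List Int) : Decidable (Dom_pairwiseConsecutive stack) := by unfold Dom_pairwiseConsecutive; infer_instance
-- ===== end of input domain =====

-- B replaces A's two-phase temp-stack simulation by one non-mutating pass over index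
-- pairs; equivalence is about the RETURN value (A pops and pushes stack back, restoring
-- its original content, so A's net mutation is none too).

-- ===== PORT A =====
-- while stack: temp.append(stack.pop())
def pcFill (stack temp : List Int) : List Int :=
  match h : PySem.List.pop? stack (-1) with
  | none => temp
  | some vr => pcFill vr.2 (temp ++ [vr.1])
termination_by stack.length
decreasing_by
  have := PySem.List.length_of_pop?_eq_some stack h; omega

-- while len(temp) > 1: …   (returns (result, stack); unreachable pop-failure branches
-- return the current state — pop? never fails under the length guards)
def pcLoop (temp stack : List Int) (result : Bool) : Bool × List Int :=
  if 1 < temp.length then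
    match h : PySem.List.pop? temp (-1) with
    | none => (result, stack)
    | some xr =>
      match h2 : PySem.List.pop? xr.2 (-1) with
      | none => (result, stack)
      | some yr =>
        pcLoop yr.2 (stack ++ [xr.1, yr.1])
          (if (xr.1 - yr.1).natAbs ≠ 1 then false else result)
  else
    if temp.length == 1 then
      match PySem.List.pop? temp (-1) with
      | none => (result, stack)
      | some vr => (result, stack ++ [vr.1])
    else (result, stack)
termination_by temp.length
decreasing_by
  have ha := PySem.List.length_of_pop?_eq_some temp h
  have hb := PySem.List.length_of_pop?_eq_some xr.2 h2
  omega

def pairwiseConsecutive (stack : List Int) : Bool :=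
  (pcLoop (pcFill stack []) [] true).1

-- ===== PORT B =====
def pairwiseConsecutive_alt (stack : List Int) : Bool :=
  (PySem.List.pyRange 0 ((stack.length : Int) - 1) 2).all
    (fun i => (PySem.List.pyGetD stack i 0 - PySem.List.pyGetD stack (i + 1) 0).natAbs == 1)

-- ===== PRECONDITION & SPEC =====
def Spec_pairwiseConsecutive (stack : List Int) (out : Bool) : Prop := out = pairwiseConsecutive_alt stack
instance (stack : List Int) (out : Bool) : Decidable (Spec_pairwiseConsecutive stack out) := by unfold Spec_pairwiseConsecutive; infer_instance

-- ===== CLAIM (what is proved, stated in full; the proofs are below) =====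
def Claim_equal_pairwiseConsecutive : Prop := ∀ (stack : List Int), Dom_pairwiseConsecutive stack → Spec_pairwiseConsecutive stack (pairwiseConsecutive stack)

-- ===== LEMMAS AND PROOFS =====

-- common reference function: each adjacent pair (0,1),(2,3),… differs by exactly 1
def chk : List Int → Bool
  | x :: y :: r => ((x - y).natAbs == 1) && chk r
  | _ => true

theorem pop?_nil : PySem.List.pop? ([] : List Int) = none := by
  simp [PySem.List.pop?, PySem.List.pyIdx?]

theorem pcFill_eq (stack temp : List Int) : pcFill stack temp = temp ++ stack.reverse := by
  induction stack using List.reverseRecOn generalizing temp with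
  | nil =>
      rw [pcFill.eq_def]
      split
      · simp
      · rename_i vr heq
        rw [pop?_nil] at heq
        cases heq
  | append_singleton l a ih =>
      rw [pcFill.eq_def]
      split
      · rename_i heq
        rw [PySem.List.pop?_last] at heq
        cases heq
      · rename_i vr heq
        rw [PySem.List.pop?_last] at heq
        injection heq with h3
        subst h3
        rw [ih]
        simp

theorem pcLoop_fst (l stack : List Int) (result : Bool) :
    (pcLoop l.reverse stack result).1 = (result && chk l) := by
  match l with
  | [] =>
      rw [List.reverse_nil, pcLoop.eq_def]
      rw [if_neg (by simp)]
      simp [chk]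
  | [x] =>
      have hp : PySem.List.pop? [x] = some (x, ([] : List Int)) := by
        simpa using PySem.List.pop?_last [] x
      rw [show ([x] : List Int).reverse = [x] from rfl, pcLoop.eq_def]
      rw [if_neg (by simp)]
      simp [chk, hp]
  | x :: y :: r =>
      have hrev : (x :: y :: r).reverse = (r.reverse ++ [y]) ++ [x] := by simp
      have hlen : 1 < ((r.reverse ++ [y]) ++ [x]).length := by simp
      have ih := pcLoop_fst r (stack ++ [x, y]) (if (x - y).natAbs ≠ 1 then false else result)
      rw [hrev, pcLoop.eq_def, if_pos hlen]
      split
      · rename_i heq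
        rw [PySem.List.pop?_last] at heq
        cases heq
      · rename_i xr heq
        rw [PySem.List.pop?_last] at heq
        injection heq with h3
        subst h3
        split
        · rename_i heq2
          rw [PySem.List.pop?_last] at heq2
          cases heq2
        · rename_i yr heq2
          rw [PySem.List.pop?_last] at heq2
          injection heq2 with h4
          subst h4
          rw [ih]
          by_cases hc : (x - y).natAbs = 1
          · simp [chk, hc]
          · simp [chk, hc]
termination_by l.length

theorem portA_eq_chk (stack : List Int) : pairwiseConsecutive stack = chk stack := by
  unfold pairwiseConsecutive
  rw [pcFill_eq, List.nil_append]
  have h := pcLoop_fst stack [] true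
  rw [Bool.true_and] at h
  exact h

theorem range2 (m : Nat) :
    PySem.List.pyRange 0 (m : Int) 2 = (List.range ((m + 1) / 2)).map (fun k => ((2 * k : Nat) : Int)) := by
  rw [PySem.List.pyRange_of_pos 0 (m : Int) (by norm_num)]
  have hcount : (if (0 : Int) < (m : Int) then (((m : Int) - 0 + 2 - 1) / 2).toNat else 0) = (m + 1) / 2 := by
    split_ifs with h
    · omega
    · omega
  rw [hcount]
  apply List.map_congr_left
  intro k _
  push_cast
  ring

theorem portB_eq_rangeAll (s : List Int) :
    pairwiseConsecutive_alt s =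
      (List.range (s.length / 2)).all
        (fun k => (s.getD (2 * k) 0 - s.getD (2 * k + 1) 0).natAbs == 1) := by
  unfold pairwiseConsecutive_alt
  match s with
  | [] => decide
  | a :: t =>
      have hm : (((a :: t).length : Nat) : Int) - 1 = ((t.length : Nat) : Int) := by simp
      rw [hm, range2, List.all_map]
      have hc : (t.length + 1) / 2 = (a :: t).length / 2 := by simp
      rw [hc]
      apply List.all_congr rfl
      intro k
      simp only [Function.comp_apply]
      have h1 : ((2 * k : Nat) : Int) + 1 = ((2 * k + 1 : Nat) : Int) := by push_cast; ring
      rw [h1, PySem.List.pyGetD_natCast, PySem.List.pyGetD_natCast]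

theorem rangeAll_eq_chk (s : List Int) :
    (List.range (s.length / 2)).all
        (fun k => (s.getD (2 * k) 0 - s.getD (2 * k + 1) 0).natAbs == 1) = chk s := by
  match s with
  | [] => simp [chk]
  | [x] => simp [chk]
  | x :: y :: r =>
      have ih := rangeAll_eq_chk r
      have hl : (x :: y :: r).length / 2 = r.length / 2 + 1 := by simp; omega
      rw [hl, List.range_succ_eq_map, List.all_cons, List.all_map]
      have hall : (List.range (r.length / 2)).all
          ((fun k => ((x :: y :: r).getD (2 * k) 0 - (x :: y :: r).getD (2 * k + 1) 0).natAbs == 1) ∘ Nat.succ)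
          = chk r := by
        rw [← ih]
        apply List.all_congr rfl
        intro k
        simp only [Function.comp_apply, Nat.succ_eq_add_one]
        have e2 : 2 * (k + 1) + 1 = 2 * k + 1 + 1 + 1 := by omega
        have e1 : 2 * (k + 1) = 2 * k + 1 + 1 := by omega
        rw [e2, e1, List.getD_cons_succ, List.getD_cons_succ, List.getD_cons_succ, List.getD_cons_succ]
      rw [hall]
      simp [chk]
termination_by s.length

-- ===== VERDICT (by name: the statement is the Claim_ definition above) =====
theorem pairwiseConsecutive_spec : Claim_equal_pairwiseConsecutive := by
  intro stack _
  unfold Spec_pairwiseConsecutive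
  rw [portA_eq_chk, portB_eq_rangeAll, rangeAll_eq_chk]
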